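-- pv_equiv track=rewrite | github.com/Skizzdag/ComProg-Grader | 07/07_Password_Strength.py | keyboard_pattern
-- ===== SOURCE A (Python) =====
-- l1 = "!@#$%^&*()_+"
--
-- l2 = "qwertyuiop"
--
-- l3 = "asdfghjkl"
--
-- l4 = "zxcvbnm"
--
-- def keyboard_pattern(t):
--     i = 0
--     while i < len(t)-3:
--         if t[i:i+4].lower() in  l1 or t[i:i+4].lower() in  l1[::-1]:
--             return False
--         elif t[i:i+4].lower() in  l2 or t[i:i+4].lower() in  l2[::-1]:
--             return False
--         elif t[i:i+4].lower() in  l3 or t[i:i+4].lower() in  l3[::-1]: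
--             return False
--         elif t[i:i+4].lower() in  l4 or t[i:i+4].lower() in  l4[::-1]:
--             return False
--         i += 1
--     return True
-- ===== SOURCE B (Python) =====
-- l1 = "!@#$%^&*()_+"
--
-- l2 = "qwertyuiop"
--
-- l3 = "asdfghjkl"
--
-- l4 = "zxcvbnm"
--
-- POS = {c: (r, j) for r, row in enumerate((l1, l2, l3, l4)) for j, c in enumerate(row)}
--
-- def keyboard_pattern(t):
--     # Single pass over the characters: track the length of the current run of
--     # keyboard-adjacent characters going in one direction; a run of 4 means a
--     # length-4 window equal to a substring of a row or a reversed row.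
--     run = 1
--     dirn = 0
--     prev = None
--     for ch in t:
--         cur = POS.get(ch.lower())
--         if prev is not None and cur is not None and prev[0] == cur[0] and abs(cur[1] - prev[1]) == 1:
--             d = cur[1] - prev[1]
--             if d == dirn:
--                 run += 1
--             else:
--                 run = 2
--                 dirn = d
--         else:
--             run = 1
--             dirn = 0
--         if run >= 4:
--             return False
--         prev = cur
--     return True
-- ===== Notes on version B (the rewrite author's own statement) =====
-- stated objective: faster
-- what changed: Replaces A's sliding-window substring tests (each length-4 window searched in four row strings and their reversals) by a precomputed char->(row,column) position map and a single character-by-character pass that tracks the length of the current run of same-row, same-direction adjacent keys, failing when a run reaches 4.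
import Mathlib
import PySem

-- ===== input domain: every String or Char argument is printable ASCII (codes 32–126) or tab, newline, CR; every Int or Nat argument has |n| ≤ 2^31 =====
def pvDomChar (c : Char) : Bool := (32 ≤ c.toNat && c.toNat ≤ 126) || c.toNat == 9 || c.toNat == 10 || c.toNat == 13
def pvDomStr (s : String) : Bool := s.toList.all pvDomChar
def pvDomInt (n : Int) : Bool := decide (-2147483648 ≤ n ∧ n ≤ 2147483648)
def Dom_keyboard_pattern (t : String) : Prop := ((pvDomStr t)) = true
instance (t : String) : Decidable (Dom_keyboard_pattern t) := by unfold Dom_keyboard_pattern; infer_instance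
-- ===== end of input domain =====

-- B replaces A's per-window substring searches by a char->(row,column) position map and a single
-- pass tracking the run length of same-row, same-direction adjacent keys (objective: faster, measured).

-- ===== PORT A =====
def kpL1 : List Char := "!@#$%^&*()_+".toList
def kpL2 : List Char := "qwertyuiop".toList
def kpL3 : List Char := "asdfghjkl".toList
def kpL4 : List Char := "zxcvbnm".toList

-- the while loop of A: i ranges while i < len(t)-3; each window t[i:i+4].lower()
def kpLoop (t : List Char) (i : Nat) : Bool :=
  if h : (i : Int) < (t.length : Int) - 3 then
    let w := PySem.Chars.lower (PySem.List.slice t (some (i : Int)) (some ((i : Int) + 4)))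
    if PySem.Chars.isIn w kpL1 || PySem.Chars.isIn w kpL1.reverse then false
    else if PySem.Chars.isIn w kpL2 || PySem.Chars.isIn w kpL2.reverse then false
    else if PySem.Chars.isIn w kpL3 || PySem.Chars.isIn w kpL3.reverse then false
    else if PySem.Chars.isIn w kpL4 || PySem.Chars.isIn w kpL4.reverse then false
    else kpLoop t (i + 1)
  else true
termination_by t.length - i
decreasing_by omega

def keyboard_pattern (t : String) : Bool := kpLoop t.toList 0

-- ===== PORT B =====
-- POS = {c: (r, j) for r, row in enumerate(ROWS) for j, c in enumerate(row)}
def kpRows : List (List Char) := [kpL1, kpL2, kpL3, kpL4]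

def kpPOS : PySem.Dict Char (Int × Int) :=
  ((PySem.List.enumerate kpRows).flatMap (fun rrow =>
      (PySem.List.enumerate rrow.2).map (fun jc => (jc.2, (rrow.1, jc.1))))).foldl
    (fun d p => d.insert p.1 p.2) PySem.Dict.empty

-- the for-loop of Source B: state (run, dirn, prev); 'abs(cur[1]-prev[1]) == 1' is natAbs = 1
def kpAltLoop : List Char → Int → Int → Option (Int × Int) → Bool
  | [], _, _, _ => true
  | ch :: rest, run, dirn, prev =>
    let cur := kpPOS.get? (PySem.Chars.lowerChar ch)
    let s : Int × Int :=
      match prev, cur with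
      | some p, some c =>
        if p.1 = c.1 ∧ (c.2 - p.2).natAbs = 1 then
          if c.2 - p.2 = dirn then (run + 1, dirn) else (2, c.2 - p.2)
        else (1, 0)
      | _, _ => (1, 0)
    if 4 ≤ s.1 then false else kpAltLoop rest s.1 s.2 cur

def keyboard_pattern_alt (t : String) : Bool := kpAltLoop t.toList 1 0 none

-- ===== PRECONDITION & SPEC =====
def Spec_keyboard_pattern (t : String) (out : Bool) : Prop := out = keyboard_pattern_alt t
instance (t : String) (out : Bool) : Decidable (Spec_keyboard_pattern t out) := by unfold Spec_keyboard_pattern; infer_instance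

-- ===== CLAIM (what is proved, stated in full; the proofs are below) =====
def Claim_equal_keyboard_pattern : Prop := ∀ (t : String), Dom_keyboard_pattern t → Spec_keyboard_pattern t (keyboard_pattern t)

-- ===== LEMMAS AND PROOFS =====

-- A's per-window test, as a Bool on the raw character list
def kpWinB (t : List Char) (j : Nat) : Bool :=
  let w := PySem.Chars.lower ((t.drop j).take 4)
  (PySem.Chars.isIn w kpL1 || PySem.Chars.isIn w kpL1.reverse) ||
  (PySem.Chars.isIn w kpL2 || PySem.Chars.isIn w kpL2.reverse) ||
  (PySem.Chars.isIn w kpL3 || PySem.Chars.isIn w kpL3.reverse) ||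
  (PySem.Chars.isIn w kpL4 || PySem.Chars.isIn w kpL4.reverse)

-- keyboard-adjacency step between two (already lowered) characters
def kpStep (a b : Char) : Option Int :=
  match kpPOS.get? a, kpPOS.get? b with
  | some p, some c => if p.1 = c.1 ∧ (c.2 - p.2).natAbs = 1 then some (c.2 - p.2) else none
  | _, _ => none

def kpStepAt (u : List Char) (j : Nat) : Option Int :=
  match u[j]?, u[j + 1]? with
  | some a, some b => kpStep a b
  | _, _ => none

def kpBadAt (u : List Char) (i : Nat) : Bool :=
  match kpStepAt u i, kpStepAt u (i + 1), kpStepAt u (i + 2) with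
  | some d1, some d2, some d3 => d1 == d2 && d2 == d3
  | _, _, _ => false

def kpRowOf (r : Int) : List Char :=
  if r = 0 then kpL1 else if r = 1 then kpL2 else if r = 2 then kpL3 else if r = 3 then kpL4 else []

-- concrete facts about the position map
set_option maxRecDepth 20000 in
lemma kpPOS_items_ok : ∀ p ∈ kpPOS.items,
    0 ≤ p.2.1 ∧ p.2.1 < 4 ∧ 0 ≤ p.2.2 ∧ (kpRowOf p.2.1)[p.2.2.toNat]? = some p.1 := by
  decide

set_option maxRecDepth 8000 in
lemma kpPOS_row1 : ∀ j : Fin kpL1.length, kpPOS.get? kpL1[j] = some (0, (j.val : Int)) := by decide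
set_option maxRecDepth 8000 in
lemma kpPOS_row2 : ∀ j : Fin kpL2.length, kpPOS.get? kpL2[j] = some (1, (j.val : Int)) := by decide
set_option maxRecDepth 8000 in
lemma kpPOS_row3 : ∀ j : Fin kpL3.length, kpPOS.get? kpL3[j] = some (2, (j.val : Int)) := by decide
set_option maxRecDepth 8000 in
lemma kpPOS_row4 : ∀ j : Fin kpL4.length, kpPOS.get? kpL4[j] = some (3, (j.val : Int)) := by decide

lemma kpPOS_of_get (r : Int) (hr : r = 0 ∨ r = 1 ∨ r = 2 ∨ r = 3) (j : Nat) (a : Char)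
    (h : (kpRowOf r)[j]? = some a) : kpPOS.get? a = some (r, (j : Int)) := by
  rcases hr with rfl | rfl | rfl | rfl
  · norm_num [kpRowOf] at h
    obtain ⟨hj, ha⟩ := List.getElem?_eq_some_iff.mp h
    exact ha ▸ kpPOS_row1 ⟨j, hj⟩
  · norm_num [kpRowOf] at h
    obtain ⟨hj, ha⟩ := List.getElem?_eq_some_iff.mp h
    exact ha ▸ kpPOS_row2 ⟨j, hj⟩
  · norm_num [kpRowOf] at h
    obtain ⟨hj, ha⟩ := List.getElem?_eq_some_iff.mp h
    exact ha ▸ kpPOS_row3 ⟨j, hj⟩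
  · norm_num [kpRowOf] at h
    obtain ⟨hj, ha⟩ := List.getElem?_eq_some_iff.mp h
    exact ha ▸ kpPOS_row4 ⟨j, hj⟩

lemma kpRow_of_pos (a : Char) (r j : Int) (h : kpPOS.get? a = some (r, j)) :
    0 ≤ r ∧ r < 4 ∧ 0 ≤ j ∧ (kpRowOf r)[j.toNat]? = some a := by
  exact kpPOS_items_ok (a, (r, j)) (PySem.Dict.mem_items_of_get?_eq_some kpPOS h)

-- length-4 infix ↔ four consecutive getElem?
lemma kpInfix4 (a b c e : Char) (p : List Char) :
    [a, b, c, e] <:+: p ↔ ∃ j, p[j]? = some a ∧ p[j+1]? = some b ∧ p[j+2]? = some c ∧ p[j+3]? = some e := by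
  constructor
  · rintro ⟨s, t2, rfl⟩
    refine ⟨s.length, ?_, ?_, ?_, ?_⟩ <;>
      simp
  · rintro ⟨j, h1, h2, h3, h4⟩
    obtain ⟨hj1, ha⟩ := List.getElem?_eq_some_iff.mp h1
    obtain ⟨hj2, hb⟩ := List.getElem?_eq_some_iff.mp h2
    obtain ⟨hj3, hc⟩ := List.getElem?_eq_some_iff.mp h3
    obtain ⟨hj4, he⟩ := List.getElem?_eq_some_iff.mp h4
    have hpre : [a, b, c, e] <+: p.drop j := by
      refine ⟨p.drop (j + 4), ?_⟩
      rw [← ha, ← hb, ← hc, ← he]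
      show p[j] :: p[j+1] :: p[j+2] :: p[j+3] :: p.drop (j+4) = p.drop j
      rw [show j+4 = j+3+1 from rfl, List.getElem_cons_drop hj4,
          show j+3 = j+2+1 from rfl, List.getElem_cons_drop hj3,
          show j+2 = j+1+1 from rfl, List.getElem_cons_drop hj2,
          List.getElem_cons_drop hj1]
    exact hpre.isInfix.trans (List.drop_suffix j p).isInfix


lemma kpRowOf_0 : kpRowOf 0 = kpL1 := rfl
lemma kpRowOf_1 : kpRowOf 1 = kpL2 := rfl
lemma kpRowOf_2 : kpRowOf 2 = kpL3 := rfl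
lemma kpRowOf_3 : kpRowOf 3 = kpL4 := rfl

lemma kpStep_mk (a b : Char) (p c : Int × Int) (ha : kpPOS.get? a = some p)
    (hb : kpPOS.get? b = some c) (hr : p.1 = c.1) (h1 : (c.2 - p.2).natAbs = 1) :
    kpStep a b = some (c.2 - p.2) := by
  unfold kpStep; rw [ha, hb]; simp [hr, h1]

lemma kpStep_elim (a b : Char) (d : Int) (h : kpStep a b = some d) :
    ∃ p c, kpPOS.get? a = some p ∧ kpPOS.get? b = some c ∧
      p.1 = c.1 ∧ (c.2 - p.2).natAbs = 1 ∧ d = c.2 - p.2 := by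
  unfold kpStep at h
  cases ha : kpPOS.get? a with
  | none => rw [ha] at h; exact absurd h (by simp)
  | some p =>
    cases hb : kpPOS.get? b with
    | none => rw [ha, hb] at h; exact absurd h (by simp)
    | some c =>
      rw [ha, hb] at h
      dsimp only at h
      split_ifs at h with hcond
      · exact ⟨p, c, rfl, rfl, hcond.1, hcond.2, (Option.some_inj.mp h).symm⟩

lemma kpStepAt_mk (u : List Char) (j : Nat) (a b : Char) (ha : u[j]? = some a)
    (hb : u[j+1]? = some b) : kpStepAt u j = kpStep a b := by
  unfold kpStepAt; rw [ha, hb]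

lemma kpStepAt_elim (u : List Char) (j : Nat) (d : Int) (h : kpStepAt u j = some d) :
    ∃ a b, u[j]? = some a ∧ u[j+1]? = some b ∧ kpStep a b = some d := by
  unfold kpStepAt at h
  cases ha : u[j]? with
  | none => rw [ha] at h; exact absurd h (by simp)
  | some a =>
    cases hb : u[j+1]? with
    | none => rw [ha, hb] at h; exact absurd h (by simp)
    | some b => rw [ha, hb] at h; exact ⟨a, b, rfl, rfl, h⟩

lemma kpBadAt_iff (u : List Char) (i : Nat) : kpBadAt u i = true ↔
    ∃ d, kpStepAt u i = some d ∧ kpStepAt u (i+1) = some d ∧ kpStepAt u (i+2) = some d := by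
  unfold kpBadAt
  cases h1 : kpStepAt u i <;> cases h2 : kpStepAt u (i+1) <;> cases h3 : kpStepAt u (i+2) <;>
    simp_all
  omega

lemma kpSteps_of_row (r : Int) (hr : r = 0 ∨ r = 1 ∨ r = 2 ∨ r = 3) (a b c e : Char)
    (h : [a,b,c,e] <:+: kpRowOf r) :
    kpStep a b = some 1 ∧ kpStep b c = some 1 ∧ kpStep c e = some 1 := by
  obtain ⟨j, h1, h2, h3, h4⟩ := (kpInfix4 a b c e (kpRowOf r)).mp h
  have pa := kpPOS_of_get r hr j a h1
  have pb := kpPOS_of_get r hr (j+1) b h2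
  have pc := kpPOS_of_get r hr (j+2) c h3
  have pe := kpPOS_of_get r hr (j+3) e h4
  refine ⟨?_, ?_, ?_⟩
  · have := kpStep_mk a b (r, (j:Int)) (r, ((j+1:Nat):Int)) pa pb rfl (by push_cast; norm_num)
    rwa [show (((j+1:Nat):Int) - (j:Int)) = 1 by push_cast; ring] at this
  · have := kpStep_mk b c (r, ((j+1:Nat):Int)) (r, ((j+2:Nat):Int)) pb pc rfl (by push_cast; norm_num)
    rwa [show (((j+2:Nat):Int) - ((j+1:Nat):Int)) = 1 by push_cast; ring] at this
  · have := kpStep_mk c e (r, ((j+2:Nat):Int)) (r, ((j+3:Nat):Int)) pc pe rfl (by push_cast; norm_num)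
    rwa [show (((j+3:Nat):Int) - ((j+2:Nat):Int)) = 1 by push_cast; ring] at this

lemma kpSteps_of_rowrev (r : Int) (hr : r = 0 ∨ r = 1 ∨ r = 2 ∨ r = 3) (a b c e : Char)
    (h : [a,b,c,e] <:+: (kpRowOf r).reverse) :
    kpStep a b = some (-1) ∧ kpStep b c = some (-1) ∧ kpStep c e = some (-1) := by
  have h' : [e,c,b,a] <:+: kpRowOf r := by
    have := h.reverse; simpa using this
  obtain ⟨j, h1, h2, h3, h4⟩ := (kpInfix4 e c b a (kpRowOf r)).mp h'
  have pe := kpPOS_of_get r hr j e h1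
  have pc := kpPOS_of_get r hr (j+1) c h2
  have pb := kpPOS_of_get r hr (j+2) b h3
  have pa := kpPOS_of_get r hr (j+3) a h4
  refine ⟨?_, ?_, ?_⟩
  · have := kpStep_mk a b (r, ((j+3:Nat):Int)) (r, ((j+2:Nat):Int)) pa pb rfl (by push_cast; norm_num)
    rwa [show (((j+2:Nat):Int) - ((j+3:Nat):Int)) = -1 by push_cast; ring] at this
  · have := kpStep_mk b c (r, ((j+2:Nat):Int)) (r, ((j+1:Nat):Int)) pb pc rfl (by push_cast; norm_num)
    rwa [show (((j+1:Nat):Int) - ((j+2:Nat):Int)) = -1 by push_cast; ring] at this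
  · have := kpStep_mk c e (r, ((j+1:Nat):Int)) (r, ((j:Nat):Int)) pc pe rfl (by push_cast; norm_num)
    rwa [show (((j:Nat):Int) - ((j+1:Nat):Int)) = -1 by push_cast; ring] at this

lemma kpRow_of_steps (a b c e : Char) (d : Int)
    (h1 : kpStep a b = some d) (h2 : kpStep b c = some d) (h3 : kpStep c e = some d) :
    ∃ r, (r = 0 ∨ r = 1 ∨ r = 2 ∨ r = 3) ∧
      ([a,b,c,e] <:+: kpRowOf r ∨ [a,b,c,e] <:+: (kpRowOf r).reverse) := by
  obtain ⟨pa, cb, ga, gb, hr1, hn1, hd1⟩ := kpStep_elim a b d h1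
  obtain ⟨pb, cc, gb', gc, hr2, hn2, hd2⟩ := kpStep_elim b c d h2
  obtain ⟨pc, ce, gc', ge, hr3, hn3, hd3⟩ := kpStep_elim c e d h3
  rw [gb] at gb'; rw [gc] at gc'
  obtain rfl := Option.some_inj.mp gb'
  obtain rfl := Option.some_inj.mp gc'
  obtain ⟨ra, xa⟩ := pa
  obtain ⟨rb, xb⟩ := cb
  obtain ⟨rc, xc⟩ := cc
  obtain ⟨re, xe⟩ := ce
  simp only at hr1 hr2 hr3 hd1 hd2 hd3 hn1 hn2 hn3
  subst hr1; subst hr2; subst hr3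
  obtain ⟨hra0, hra4, hxa0, grow_a⟩ := kpRow_of_pos a ra xa ga
  obtain ⟨_, _, hxb0, grow_b⟩ := kpRow_of_pos b ra xb gb
  obtain ⟨_, _, hxc0, grow_c⟩ := kpRow_of_pos c ra xc gc
  obtain ⟨_, _, hxe0, grow_e⟩ := kpRow_of_pos e ra xe ge
  refine ⟨ra, by omega, ?_⟩
  have hd : d = 1 ∨ d = -1 := by omega
  rcases hd with rfl | rfl
  · left
    refine (kpInfix4 a b c e (kpRowOf ra)).mpr ⟨xa.toNat, grow_a, ?_, ?_, ?_⟩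
    · rw [show xa.toNat + 1 = xb.toNat by omega]; exact grow_b
    · rw [show xa.toNat + 2 = xc.toNat by omega]; exact grow_c
    · rw [show xa.toNat + 3 = xe.toNat by omega]; exact grow_e
  · right
    have h' : [e,c,b,a] <:+: kpRowOf ra := by
      refine (kpInfix4 e c b a (kpRowOf ra)).mpr ⟨xe.toNat, grow_e, ?_, ?_, ?_⟩
      · rw [show xe.toNat + 1 = xc.toNat by omega]; exact grow_c
      · rw [show xe.toNat + 2 = xb.toNat by omega]; exact grow_b
      · rw [show xe.toNat + 3 = xa.toNat by omega]; exact grow_a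
    have := h'.reverse; simpa using this

-- the window test on four characters equals the step condition
set_option maxRecDepth 20000 in
lemma kpWchar (a b c e : Char) :
    ((PySem.Chars.isIn [a,b,c,e] kpL1 || PySem.Chars.isIn [a,b,c,e] kpL1.reverse) ||
     (PySem.Chars.isIn [a,b,c,e] kpL2 || PySem.Chars.isIn [a,b,c,e] kpL2.reverse) ||
     (PySem.Chars.isIn [a,b,c,e] kpL3 || PySem.Chars.isIn [a,b,c,e] kpL3.reverse) ||
     (PySem.Chars.isIn [a,b,c,e] kpL4 || PySem.Chars.isIn [a,b,c,e] kpL4.reverse)) = true ↔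
    ∃ d, kpStep a b = some d ∧ kpStep b c = some d ∧ kpStep c e = some d := by
  constructor
  · intro h
    simp only [Bool.or_eq_true, PySem.Chars.isIn_iff_infix] at h
    rcases h with (((h | h) | (h | h)) | (h | h)) | (h | h)
    · obtain ⟨s1, s2, s3⟩ := kpSteps_of_row 0 (by norm_num) a b c e (kpRowOf_0 ▸ h)
      exact ⟨1, s1, s2, s3⟩
    · obtain ⟨s1, s2, s3⟩ := kpSteps_of_rowrev 0 (by norm_num) a b c e (kpRowOf_0 ▸ h)
      exact ⟨-1, s1, s2, s3⟩
    · obtain ⟨s1, s2, s3⟩ := kpSteps_of_row 1 (by norm_num) a b c e (kpRowOf_1 ▸ h)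
      exact ⟨1, s1, s2, s3⟩
    · obtain ⟨s1, s2, s3⟩ := kpSteps_of_rowrev 1 (by norm_num) a b c e (kpRowOf_1 ▸ h)
      exact ⟨-1, s1, s2, s3⟩
    · obtain ⟨s1, s2, s3⟩ := kpSteps_of_row 2 (by norm_num) a b c e (kpRowOf_2 ▸ h)
      exact ⟨1, s1, s2, s3⟩
    · obtain ⟨s1, s2, s3⟩ := kpSteps_of_rowrev 2 (by norm_num) a b c e (kpRowOf_2 ▸ h)
      exact ⟨-1, s1, s2, s3⟩
    · obtain ⟨s1, s2, s3⟩ := kpSteps_of_row 3 (by norm_num) a b c e (kpRowOf_3 ▸ h)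
      exact ⟨1, s1, s2, s3⟩
    · obtain ⟨s1, s2, s3⟩ := kpSteps_of_rowrev 3 (by norm_num) a b c e (kpRowOf_3 ▸ h)
      exact ⟨-1, s1, s2, s3⟩
  · rintro ⟨d, h1, h2, h3⟩
    obtain ⟨r, hr, hinf⟩ := kpRow_of_steps a b c e d h1 h2 h3
    simp only [Bool.or_eq_true, PySem.Chars.isIn_iff_infix]
    rcases hr with rfl | rfl | rfl | rfl <;>
      rcases hinf with h | h <;>
      simp only [kpRowOf_0, kpRowOf_1, kpRowOf_2, kpRowOf_3] at h <;> tauto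

-- the window test equals the bad-window predicate on the lowered list
lemma kpWinB_eq_badAt (t : List Char) (j : Nat) (h : j + 4 ≤ t.length) :
    kpWinB t j = kpBadAt (t.map PySem.Chars.lowerChar) j := by
  have hlen : (t.drop j).length = t.length - j := List.length_drop
  rcases hd : t.drop j with _ | ⟨a, _ | ⟨b, _ | ⟨c, _ | ⟨e, rest⟩⟩⟩⟩ <;>
    [skip; skip; skip; skip; skip] <;> (try (rw [hd] at hlen; simp at hlen; omega))
  case cons.cons.cons.cons =>
  have g0 : t[j]? = some a := by
    have := List.getElem?_drop (xs := t) (i := j) (j := 0); rw [hd] at this; simpa using this.symm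
  have g1 : t[j+1]? = some b := by
    have := List.getElem?_drop (xs := t) (i := j) (j := 1); rw [hd] at this; simpa using this.symm
  have g2 : t[j+2]? = some c := by
    have := List.getElem?_drop (xs := t) (i := j) (j := 2); rw [hd] at this; simpa using this.symm
  have g3 : t[j+3]? = some e := by
    have := List.getElem?_drop (xs := t) (i := j) (j := 3); rw [hd] at this; simpa using this.symm
  have u0 : (t.map PySem.Chars.lowerChar)[j]? = some (PySem.Chars.lowerChar a) := by
    simp [List.getElem?_map, g0]
  have u1 : (t.map PySem.Chars.lowerChar)[j+1]? = some (PySem.Chars.lowerChar b) := by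
    simp [List.getElem?_map, g1]
  have u2 : (t.map PySem.Chars.lowerChar)[j+2]? = some (PySem.Chars.lowerChar c) := by
    simp [List.getElem?_map, g2]
  have u3 : (t.map PySem.Chars.lowerChar)[j+3]? = some (PySem.Chars.lowerChar e) := by
    simp [List.getElem?_map, g3]
  have s0 : kpStepAt (t.map PySem.Chars.lowerChar) j =
      kpStep (PySem.Chars.lowerChar a) (PySem.Chars.lowerChar b) := kpStepAt_mk _ _ _ _ u0 u1
  have s1 : kpStepAt (t.map PySem.Chars.lowerChar) (j+1) =
      kpStep (PySem.Chars.lowerChar b) (PySem.Chars.lowerChar c) := kpStepAt_mk _ _ _ _ u1 u2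
  have s2 : kpStepAt (t.map PySem.Chars.lowerChar) (j+2) =
      kpStep (PySem.Chars.lowerChar c) (PySem.Chars.lowerChar e) := kpStepAt_mk _ _ _ _ u2 u3
  have hw : kpWinB t j = ((PySem.Chars.isIn [PySem.Chars.lowerChar a, PySem.Chars.lowerChar b, PySem.Chars.lowerChar c, PySem.Chars.lowerChar e] kpL1 || PySem.Chars.isIn [PySem.Chars.lowerChar a, PySem.Chars.lowerChar b, PySem.Chars.lowerChar c, PySem.Chars.lowerChar e] kpL1.reverse) ||
      (PySem.Chars.isIn [PySem.Chars.lowerChar a, PySem.Chars.lowerChar b, PySem.Chars.lowerChar c, PySem.Chars.lowerChar e] kpL2 || PySem.Chars.isIn [PySem.Chars.lowerChar a, PySem.Chars.lowerChar b, PySem.Chars.lowerChar c, PySem.Chars.lowerChar e] kpL2.reverse) ||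
      (PySem.Chars.isIn [PySem.Chars.lowerChar a, PySem.Chars.lowerChar b, PySem.Chars.lowerChar c, PySem.Chars.lowerChar e] kpL3 || PySem.Chars.isIn [PySem.Chars.lowerChar a, PySem.Chars.lowerChar b, PySem.Chars.lowerChar c, PySem.Chars.lowerChar e] kpL3.reverse) ||
      (PySem.Chars.isIn [PySem.Chars.lowerChar a, PySem.Chars.lowerChar b, PySem.Chars.lowerChar c, PySem.Chars.lowerChar e] kpL4 || PySem.Chars.isIn [PySem.Chars.lowerChar a, PySem.Chars.lowerChar b, PySem.Chars.lowerChar c, PySem.Chars.lowerChar e] kpL4.reverse)) := by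
    unfold kpWinB; rw [hd]; rfl
  rw [Bool.eq_iff_iff, hw, kpBadAt_iff, s0, s1, s2]
  exact kpWchar _ _ _ _

lemma kpBadAt_bound (u : List Char) (i : Nat) (h : kpBadAt u i = true) : i + 4 ≤ u.length := by
  obtain ⟨d, _, _, h3⟩ := (kpBadAt_iff u i).mp h
  obtain ⟨a, b, _, hb, _⟩ := kpStepAt_elim u (i+2) d h3
  have := (List.getElem?_eq_some_iff.mp hb).1
  omega

-- characterization of A's loop
lemma kpLoop_char (t : List Char) (i : Nat) :
    kpLoop t i = true ↔ ∀ j, i ≤ j → j + 4 ≤ t.length → kpWinB t j = false := by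
  have hw : ∀ i : Nat, PySem.List.slice t (some (i : Int)) (some ((i : Int) + 4)) =
      (t.drop i).take 4 := by
    intro i
    rw [show ((i:Int) + 4) = ((i:Int) + ((4:Nat):Int)) by norm_num, PySem.List.slice_natCast_add]
  fun_induction kpLoop t i with
  | case1 i h w c1 =>
    have hwe : w = PySem.Chars.lower ((t.drop i).take 4) := by
      rw [show w = PySem.Chars.lower (PySem.List.slice t (some (i:Int)) (some ((i:Int)+4))) from
        rfl, hw i]
    rw [hwe] at c1
    refine iff_of_false (by simp) ?_
    intro hall
    have hwin := hall i le_rfl (by omega)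
    unfold kpWinB at hwin
    simp only [c1, Bool.true_or] at hwin
    simp at hwin
  | case2 i h w c1 c2 =>
    have hwe : w = PySem.Chars.lower ((t.drop i).take 4) := by
      rw [show w = PySem.Chars.lower (PySem.List.slice t (some (i:Int)) (some ((i:Int)+4))) from
        rfl, hw i]
    rw [hwe] at c2
    refine iff_of_false (by simp) ?_
    intro hall
    have hwin := hall i le_rfl (by omega)
    unfold kpWinB at hwin
    simp only [c2, Bool.true_or, Bool.or_true] at hwin
    simp at hwin
  | case3 i h w c1 c2 c3 =>
    have hwe : w = PySem.Chars.lower ((t.drop i).take 4) := by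
      rw [show w = PySem.Chars.lower (PySem.List.slice t (some (i:Int)) (some ((i:Int)+4))) from
        rfl, hw i]
    rw [hwe] at c3
    refine iff_of_false (by simp) ?_
    intro hall
    have hwin := hall i le_rfl (by omega)
    unfold kpWinB at hwin
    simp only [c3, Bool.true_or, Bool.or_true] at hwin
    simp at hwin
  | case4 i h w c1 c2 c3 c4 =>
    have hwe : w = PySem.Chars.lower ((t.drop i).take 4) := by
      rw [show w = PySem.Chars.lower (PySem.List.slice t (some (i:Int)) (some ((i:Int)+4))) from
        rfl, hw i]
    rw [hwe] at c4
    refine iff_of_false (by simp) ?_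
    intro hall
    have hwin := hall i le_rfl (by omega)
    unfold kpWinB at hwin
    simp only [c4, Bool.or_true] at hwin
    simp at hwin
  | case5 i h w c1 c2 c3 c4 ih =>
    have hwe : w = PySem.Chars.lower ((t.drop i).take 4) := by
      rw [show w = PySem.Chars.lower (PySem.List.slice t (some (i:Int)) (some ((i:Int)+4))) from
        rfl, hw i]
    rw [hwe] at c1 c2 c3 c4
    constructor
    · intro hrec j hij hj4
      rcases Nat.eq_or_lt_of_le hij with rfl | hlt
      · unfold kpWinB
        simp only [Bool.or_eq_true, not_or, Bool.not_eq_true] at c1 c2 c3 c4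
        simp [c1.1, c1.2, c2.1, c2.2, c3.1, c3.2, c4.1, c4.2]
      · exact ih.mp hrec j hlt hj4
    · intro hall
      exact ih.mpr (fun j hj hj4 => hall j (by omega) hj4)
  | case6 i h =>
    refine iff_of_true rfl ?_
    intro j hij hj4
    omega


lemma kpStep_none_left (a b : Char) (h : kpPOS.get? a = none) : kpStep a b = none := by
  unfold kpStep; rw [h]

lemma kpStep_none_right (a b : Char) (h : kpPOS.get? b = none) : kpStep a b = none := by
  unfold kpStep; rw [h]; cases kpPOS.get? a <;> rfl

lemma kpStep_some_some (a b : Char) (p c : Int × Int) (hp : kpPOS.get? a = some p)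
    (hc : kpPOS.get? b = some c) :
    kpStep a b = (if p.1 = c.1 ∧ (c.2 - p.2).natAbs = 1 then some (c.2 - p.2) else none) := by
  unfold kpStep; rw [hp, hc]

lemma kpShift (u : List Char) (k : Nat) (hnb : ∀ i, i + 3 = k → kpBadAt u i = false) :
    (¬ ∃ i, k ≤ i + 3 ∧ kpBadAt u i = true) ↔ (¬ ∃ i, k + 1 ≤ i + 3 ∧ kpBadAt u i = true) := by
  constructor
  · rintro h ⟨i, hi, hb⟩; exact h ⟨i, by omega, hb⟩
  · rintro h ⟨i, hi, hb⟩
    by_cases hik : k + 1 ≤ i + 3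
    · exact h ⟨i, hik, hb⟩
    · rw [hnb i (by omega)] at hb; simp at hb

set_option maxRecDepth 4000 in
lemma kpAltLoop_aux (t : List Char) (cs : List Char) :
    ∀ (k : Nat) (run dirn : Int) (prev : Option (Int × Int)),
    t.drop k = cs →
    k ≤ t.length →
    prev = (if k = 0 then none else ((t.map PySem.Chars.lowerChar)[k-1]?.bind kpPOS.get?)) →
    1 ≤ run → run ≤ 3 →
    (run = 1 → dirn = 0) →
    (2 ≤ run → run ≤ (k : Int)) →
    (∀ j : Nat, (k : Int) ≤ (j : Int) + run → j + 2 ≤ k →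
        kpStepAt (t.map PySem.Chars.lowerChar) j = some dirn) →
    (∀ dd, 2 ≤ k → kpStepAt (t.map PySem.Chars.lowerChar) (k-2) = some dd → 2 ≤ run ∧ dirn = dd) →
    (∀ dd, 3 ≤ k → kpStepAt (t.map PySem.Chars.lowerChar) (k-2) = some dd →
        kpStepAt (t.map PySem.Chars.lowerChar) (k-3) = some dd → 3 ≤ run) →
    (kpAltLoop cs run dirn prev = true ↔
      ¬ ∃ i, k ≤ i + 3 ∧ kpBadAt (t.map PySem.Chars.lowerChar) i = true) := by
  induction cs with
  | nil =>
    intro k run dirn prev hsuf hk _ _ _ _ _ _ _ _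
    have hlen : t.length ≤ k := by
      have := congrArg List.length hsuf; simp at this; omega
    refine iff_of_true rfl ?_
    rintro ⟨i, hi, hbad⟩
    have := kpBadAt_bound _ i hbad
    simp only [List.length_map] at this
    omega
  | cons ch rest ih =>
    intro k run dirn prev hsuf hk hprev hr1a hr1b hr2 hr3 hcov hc1 hc2
    have hlen : t.length - k = rest.length + 1 := by
      have := congrArg List.length hsuf; simpa using this
    have hklt : k < t.length := by omega
    have hch : t[k]? = some ch := by
      have h0 := List.getElem?_drop (xs := t) (i := k) (j := 0)
      rw [hsuf] at h0; simpa using h0.symm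
    have hrest : t.drop (k+1) = rest := by
      rw [← List.tail_drop, hsuf]; rfl
    have huk : (t.map PySem.Chars.lowerChar)[k]? = some (PySem.Chars.lowerChar ch) := by
      simp [List.getElem?_map, hch]
    have hprevnext : kpPOS.get? (PySem.Chars.lowerChar ch) =
        (if k + 1 = 0 then none
         else ((t.map PySem.Chars.lowerChar)[k+1-1]?.bind kpPOS.get?)) := by
      rw [if_neg (by omega), show k+1-1 = k from rfl, huk]; rfl
    -- common recursion step: apply the induction hypothesis at k+1 and shift the window bound
    have hrec : ∀ (r' d' : Int),
        1 ≤ r' → r' ≤ 3 → (r' = 1 → d' = 0) → (2 ≤ r' → r' ≤ ((k+1 : Nat) : Int)) →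
        (∀ j : Nat, ((k+1 : Nat) : Int) ≤ (j : Int) + r' → j + 2 ≤ k+1 →
            kpStepAt (t.map PySem.Chars.lowerChar) j = some d') →
        (∀ dd, 2 ≤ k+1 → kpStepAt (t.map PySem.Chars.lowerChar) (k+1-2) = some dd →
            2 ≤ r' ∧ d' = dd) →
        (∀ dd, 3 ≤ k+1 → kpStepAt (t.map PySem.Chars.lowerChar) (k+1-2) = some dd →
            kpStepAt (t.map PySem.Chars.lowerChar) (k+1-3) = some dd → 3 ≤ r') →
        (∀ i, i + 3 = k → kpBadAt (t.map PySem.Chars.lowerChar) i = false) →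
        (kpAltLoop rest r' d' (kpPOS.get? (PySem.Chars.lowerChar ch)) = true ↔
          ¬ ∃ i, k ≤ i + 3 ∧ kpBadAt (t.map PySem.Chars.lowerChar) i = true) := by
      intro r' d' h1 h2 h3 h4 h5 h6 h7 hnb
      rw [ih (k+1) r' d' _ hrest (by omega) hprevnext h1 h2 h3 h4 h5 h6 h7]
      exact (kpShift _ k hnb).symm
    by_cases hk0 : k = 0
    · -- k = 0 : prev = None, first iteration resets the run to (1, 0)
      subst hk0
      rw [hprev, if_pos rfl, kpAltLoop.eq_def]
      dsimp only
      rw [if_neg (by norm_num : ¬ (4:Int) ≤ 1)]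
      exact hrec 1 0 (by omega) (by omega) (by omega) (by intro h2; omega)
        (by intro j h1 h2; omega) (by intro dd h2 _; omega) (by intro dd h3 _ _; omega)
        (by intro i hi; omega)
    · -- k ≥ 1 : prev is the position of the previous (lowered) character
      obtain ⟨pch, hpch⟩ : ∃ a, t[k-1]? = some a :=
        ⟨t[k-1]'(by omega), List.getElem?_eq_getElem (by omega)⟩
      have hukm : (t.map PySem.Chars.lowerChar)[k-1]? = some (PySem.Chars.lowerChar pch) := by
        simp [List.getElem?_map, hpch]
      have hprev' : prev = kpPOS.get? (PySem.Chars.lowerChar pch) := by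
        rw [hprev, if_neg hk0, hukm]; rfl
      have hstepk : kpStepAt (t.map PySem.Chars.lowerChar) (k-1) =
          kpStep (PySem.Chars.lowerChar pch) (PySem.Chars.lowerChar ch) := by
        apply kpStepAt_mk _ _ _ _ hukm
        rw [show k-1+1 = k by omega]; exact huk
      rw [hprev']
      -- the branches that reset the run to (1, 0)
      have hreset : kpStepAt (t.map PySem.Chars.lowerChar) (k-1) = none →
          (kpAltLoop rest 1 0 (kpPOS.get? (PySem.Chars.lowerChar ch)) = true ↔
            ¬ ∃ i, k ≤ i + 3 ∧ kpBadAt (t.map PySem.Chars.lowerChar) i = true) := by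
        intro hnone
        refine hrec 1 0 (by omega) (by omega) (by omega) (by intro h2; omega)
          (by intro j h1 h2; omega)
          (by intro dd h2 hstep
              rw [show k+1-2 = k-1 by omega, hnone] at hstep; simp at hstep)
          (by intro dd h3 hstep _
              rw [show k+1-2 = k-1 by omega, hnone] at hstep; simp at hstep)
          ?_
        intro i hik
        by_contra hbb; rw [Bool.not_eq_false] at hbb
        obtain ⟨d', _, _, sC⟩ := (kpBadAt_iff _ i).mp hbb
        rw [show i+2 = k-1 by omega, hnone] at sC; simp at sC
      cases hgp : kpPOS.get? (PySem.Chars.lowerChar pch) with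
      | none =>
        have hsn : kpStepAt (t.map PySem.Chars.lowerChar) (k-1) = none := by
          rw [hstepk]; exact kpStep_none_left _ _ hgp
        rw [kpAltLoop.eq_def]
        dsimp only
        rw [if_neg (by norm_num : ¬ (4:Int) ≤ 1)]
        exact hreset hsn
      | some p =>
        cases hgc : kpPOS.get? (PySem.Chars.lowerChar ch) with
        | none =>
          have hsn : kpStepAt (t.map PySem.Chars.lowerChar) (k-1) = none := by
            rw [hstepk]; exact kpStep_none_right _ _ hgc
          rw [kpAltLoop.eq_def]
          dsimp only
          rw [hgc]
          dsimp only
          rw [if_neg (by norm_num : ¬ (4:Int) ≤ 1), ← hgc]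
          exact hreset hsn
        | some c =>
          have hss : kpStepAt (t.map PySem.Chars.lowerChar) (k-1) =
              (if p.1 = c.1 ∧ (c.2 - p.2).natAbs = 1 then some (c.2 - p.2) else none) := by
            rw [hstepk]; exact kpStep_some_some _ _ _ _ hgp hgc
          rw [kpAltLoop.eq_def]
          dsimp only
          rw [hgc]
          dsimp only
          by_cases hcond : p.1 = c.1 ∧ (c.2 - p.2).natAbs = 1
          · rw [if_pos hcond] at hss
            simp only [if_pos hcond]
            by_cases hd : c.2 - p.2 = dirn
            · rw [hd] at hss
              simp only [if_pos hd]
              by_cases h4 : (4:Int) ≤ run + 1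
              · rw [if_pos h4]
                refine iff_of_false (by simp) ?_
                have hk3 : 3 ≤ k := by
                  have := hr3 (by omega)
                  omega
                have s1 : kpStepAt (t.map PySem.Chars.lowerChar) (k-2) = some dirn :=
                  hcov (k-2) (by omega) (by omega)
                have s2 : kpStepAt (t.map PySem.Chars.lowerChar) (k-3) = some dirn :=
                  hcov (k-3) (by omega) (by omega)
                intro hno
                exact hno ⟨k-3, by omega, (kpBadAt_iff _ (k-3)).mpr
                  ⟨dirn, s2, by rw [show k-3+1 = k-2 by omega]; exact s1,
                    by rw [show k-3+2 = k-1 by omega]; exact hss⟩⟩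
              · rw [if_neg h4, ← hgc]
                have hrun2 : 2 ≤ run := by
                  by_contra hlt
                  have h0 : dirn = 0 := hr2 (by omega)
                  have hab := hcond.2
                  rw [hd, h0] at hab
                  simp at hab
                refine hrec (run + 1) dirn (by omega) (by omega) (by omega)
                  (by intro _; have := hr3 hrun2; push_cast; omega)
                  (by intro j h1 h2
                      by_cases hj : j + 2 ≤ k
                      · exact hcov j (by push_cast at h1 ⊢; omega) hj
                      · rw [show j = k-1 by omega]
                        exact hss)
                  (by intro dd h2 hstep
                      rw [show k+1-2 = k-1 by omega, hss] at hstep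
                      have := Option.some_inj.mp hstep
                      constructor <;> omega)
                  (by intro dd h3 hstep hstep2
                      rw [show k+1-2 = k-1 by omega, hss] at hstep
                      have hdd := Option.some_inj.mp hstep
                      rw [show k+1-3 = k-2 by omega] at hstep2
                      have := (hc1 dd (by omega) hstep2).1
                      omega)
                  ?_
                intro i hik
                by_contra hbb; rw [Bool.not_eq_false] at hbb
                obtain ⟨d', sA, sB, sC⟩ := (kpBadAt_iff _ i).mp hbb
                rw [show i+2 = k-1 by omega, hss] at sC
                have hd' := Option.some_inj.mp sC
                rw [show i+1 = k-2 by omega] at sB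
                rw [show i = k-3 by omega] at sA
                have := hc2 d' (by omega) sB sA
                omega
            · simp only [if_neg hd]
              rw [if_neg (by norm_num), ← hgc]
              refine hrec 2 (c.2 - p.2) (by omega) (by omega) (by omega)
                (by intro _; push_cast; omega)
                (by intro j h1 h2
                    rw [show j = k-1 by push_cast at h1; omega]
                    exact hss)
                (by intro dd h2 hstep
                    rw [show k+1-2 = k-1 by omega, hss] at hstep
                    have := Option.some_inj.mp hstep
                    constructor <;> omega)
                (by intro dd h3 hstep hstep2
                    rw [show k+1-2 = k-1 by omega, hss] at hstep
                    have hdd := Option.some_inj.mp hstep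
                    rw [show k+1-3 = k-2 by omega] at hstep2
                    have := (hc1 dd (by omega) hstep2).2
                    omega)
                ?_
              intro i hik
              by_contra hbb; rw [Bool.not_eq_false] at hbb
              obtain ⟨d', sA, sB, sC⟩ := (kpBadAt_iff _ i).mp hbb
              rw [show i+2 = k-1 by omega, hss] at sC
              have hd' := Option.some_inj.mp sC
              rw [show i+1 = k-2 by omega] at sB
              have := (hc1 d' (by omega) sB).2
              omega
          · rw [if_neg hcond] at hss
            simp only [if_neg hcond]
            rw [if_neg (by norm_num), ← hgc]
            exact hreset hss

-- characterization of B's loop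
lemma kpAltLoop_char (t : List Char) (k : Nat) (run dirn : Int) (prev : Option (Int × Int))
    (hk : k ≤ t.length)
    (hprev : prev = if k = 0 then none else ((t.map PySem.Chars.lowerChar)[k-1]?.bind kpPOS.get?))
    (hr1 : 1 ≤ run ∧ run ≤ 3)
    (hr2 : run = 1 → dirn = 0)
    (hr3 : 2 ≤ run → run ≤ (k : Int))
    (hcov : ∀ j : Nat, (k : Int) ≤ (j : Int) + run → j + 2 ≤ k →
        kpStepAt (t.map PySem.Chars.lowerChar) j = some dirn)
    (hc1 : ∀ dd, 2 ≤ k → kpStepAt (t.map PySem.Chars.lowerChar) (k-2) = some dd →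
        2 ≤ run ∧ dirn = dd)
    (hc2 : ∀ dd, 3 ≤ k → kpStepAt (t.map PySem.Chars.lowerChar) (k-2) = some dd →
        kpStepAt (t.map PySem.Chars.lowerChar) (k-3) = some dd → 3 ≤ run) :
    kpAltLoop (t.drop k) run dirn prev = true ↔
      ¬ ∃ i, k ≤ i + 3 ∧ kpBadAt (t.map PySem.Chars.lowerChar) i = true := by
  exact kpAltLoop_aux t (t.drop k) k run dirn prev rfl hk hprev hr1.1 hr1.2 hr2 hr3 hcov
    (fun dd h2 hstep => hc1 dd h2 hstep) hc2

-- ===== VERDICT (by name: the statement is the Claim_ definition above) =====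
theorem keyboard_pattern_spec : Claim_equal_keyboard_pattern := by
  intro t _
  unfold Spec_keyboard_pattern keyboard_pattern keyboard_pattern_alt
  rw [Bool.eq_iff_iff]
  have hA := kpLoop_char t.toList 0
  have hB := kpAltLoop_char t.toList 0 1 0 none (by omega) (by simp)
    (by omega) (by omega) (by omega)
    (by intro j h1 h2; omega)
    (by intro dd h2 _; omega)
    (by intro dd h3 _ _; omega)
  simp only [List.drop_zero] at hB
  rw [hA, hB]
  constructor
  · intro h ⟨i, _, hbad⟩
    have hb := kpBadAt_bound _ i hbad
    simp only [List.length_map] at hb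
    have := h i (by omega) (by omega)
    rw [kpWinB_eq_badAt _ i (by omega)] at this
    rw [this] at hbad; exact Bool.false_ne_true hbad
  · intro h j _ hj
    rw [kpWinB_eq_badAt _ j (by omega)]
    by_contra hb
    exact h ⟨j, by omega, by simpa using hb⟩
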